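-- pv_equiv track=rewrite | github.com/dang-kevin/CSC108 | Social Networks/network_functions.py | invert_network
-- ===== SOURCE A (Python) =====
-- from typing import List, Tuple, Dict, TextIO
--
-- def invert_network(person_to_networks: Dict[str, List[str]]) -> Dict[str, List[str]]:
--     """
--     Return a "network to people" dictionary based on the "person to networks"
--     dictionary.
--
--     >>> p2n = {'Claire Dunphy': ['Parent Teacher Association'], 'Manny Delgado': ['Chess Club'], 'Mitchell Pritchett': \
--     ['Law Association'], 'Alex Dunphy': ['Chess Club', 'Orchestra'], 'Cameron Tucker': ['Clown School', \
--     'Wizard of Oz Fan Club'], 'Phil Dunphy': ['Real Estate Association'], 'Gloria Pritchett': \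
--     ['Parent Teacher Association']}
--     >>> invert_network(p2n)
--     {'Parent Teacher Association': ['Claire Dunphy', 'Gloria Pritchett'], 'Chess Club': ['Alex Dunphy', 'Manny Delgado'], 'Law Association': ['Mitchell Pritchett'], 'Orchestra': ['Alex Dunphy'], 'Clown School': ['Cameron Tucker'], 'Wizard of Oz Fan Club': ['Cameron Tucker'], 'Real Estate Association': ['Phil Dunphy']}
--     """
--     network_to_people = {}
--
--     for person in person_to_networks:
--         networks = person_to_networks[person]
--         for network in networks:
--             if network not in network_to_people:
--                 network_to_people[network] = []
--             network_to_people[network].append(person)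
--             network_to_people[network].sort()
--     return network_to_people
-- ===== SOURCE B (Python) =====
-- def invert_network(person_to_networks):
--     """Invert person->networks into network->sorted-people, one sort-free pass.
--
--     Keys are primed in first-encounter order, then people are appended in
--     sorted-person order, so every list is already sorted without per-append
--     .sort() calls.
--     """
--     network_to_people = {}
--     for networks in person_to_networks.values():
--         for network in networks:
--             network_to_people.setdefault(network, [])
--     for person, networks in sorted(person_to_networks.items()):
--         for network in networks:
--             network_to_people[network].append(person)
--     return network_to_people
-- ===== Notes on version B (the rewrite author's own statement) =====
-- stated objective: faster
-- what changed: Instead of re-sorting each network's list after every append, B primes all network keys in first-encounter order and then makes one pass over the people in sorted order, so every list is built already sorted with a single sort of the dict items.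
import Mathlib
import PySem

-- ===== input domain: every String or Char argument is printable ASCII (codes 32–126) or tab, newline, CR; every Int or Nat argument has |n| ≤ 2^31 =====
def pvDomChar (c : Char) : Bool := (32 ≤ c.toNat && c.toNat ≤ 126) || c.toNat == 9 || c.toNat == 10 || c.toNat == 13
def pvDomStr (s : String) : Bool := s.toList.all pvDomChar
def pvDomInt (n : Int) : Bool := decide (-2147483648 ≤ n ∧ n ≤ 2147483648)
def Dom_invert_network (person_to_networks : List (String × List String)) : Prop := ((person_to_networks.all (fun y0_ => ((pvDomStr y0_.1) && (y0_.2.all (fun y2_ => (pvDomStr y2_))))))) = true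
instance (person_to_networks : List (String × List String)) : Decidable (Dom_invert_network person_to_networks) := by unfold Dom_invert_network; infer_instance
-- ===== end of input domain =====

-- B replaces A's per-append in-place .sort() by a key-priming pass plus one traversal
-- of the people in sorted order, so each network's list is built already sorted.

-- ===== PORT A =====
-- 'for person in p2n: networks = p2n[person]' = the dict's pairs in order;
-- 'if network not in: = []', then append + in-place .sort() = overwrite (position kept)
-- with sorted(old ++ [person])
def invert_network (person_to_networks : List (String × List String)) : List (String × List String) :=
  (person_to_networks.foldl
    (fun acc pn =>
      pn.2.foldl
        (fun acc network =>
          let acc := if acc.contains network then acc else acc.insert network ([] : List String)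
          acc.insert network (PySem.List.sorted (acc.getD network [] ++ [pn.1]) (fun x => x) false))
        acc)
    (PySem.Dict.empty : PySem.Dict String (List String))).items

-- ===== PORT B =====
-- priming pass over the values (setdefault), then 'for person, networks in
-- sorted(p2n.items())' appending; a dict's keys are distinct, so sorting its items
-- is exactly sorting by the person component (ported as sorted with key pn.1)
def invert_network_alt (person_to_networks : List (String × List String)) : List (String × List String) :=
  let primed := person_to_networks.foldl
    (fun acc pn => pn.2.foldl (fun acc network => acc.setdefault network ([] : List String)) acc)
    (PySem.Dict.empty : PySem.Dict String (List String))
  ((PySem.List.sorted person_to_networks (fun pn => pn.1) false).foldl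
    (fun acc pn =>
      pn.2.foldl (fun acc network => acc.insert network (acc.getD network [] ++ [pn.1])) acc)
    primed).items

-- ===== PRECONDITION & SPEC =====
def Spec_invert_network (person_to_networks : List (String × List String)) (out : List (String × List String)) : Prop := out = invert_network_alt person_to_networks
instance (person_to_networks : List (String × List String)) (out : List (String × List String)) : Decidable (Spec_invert_network person_to_networks out) := by unfold Spec_invert_network; infer_instance

-- ===== CLAIM (what is proved, stated in full; the proofs are below) =====
def Claim_equal_invert_network : Prop := ∀ (person_to_networks : List (String × List String)), Dom_invert_network person_to_networks → Spec_invert_network person_to_networks (invert_network person_to_networks)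

-- ===== LEMMAS AND PROOFS =====

def pvStepA (p : String) (acc : PySem.Dict String (List String)) (network : String) : PySem.Dict String (List String) :=
  let acc := if acc.contains network then acc else acc.insert network ([] : List String)
  acc.insert network (PySem.List.sorted (acc.getD network [] ++ [p]) (fun x => x) false)

def pvStepB (p : String) (acc : PySem.Dict String (List String)) (network : String) : PySem.Dict String (List String) :=
  acc.insert network (acc.getD network [] ++ [p])

def pvStepP (acc : PySem.Dict String (List String)) (network : String) : PySem.Dict String (List String) :=
  acc.setdefault network ([] : List String)

def pvContrib (n : String) (l : List (String × List String)) : List String :=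
  l.flatMap (fun pn => (pn.2.filter (fun m => m == n)).map (fun _ => pn.1))

def pvSortApp (u : List String) (c : List String) : List String :=
  c.foldl (fun u x => PySem.List.sorted (u ++ [x]) (fun y => y) false) u

theorem getD_pvStepA (d : PySem.Dict String (List String)) (p m n : String) :
    (pvStepA p d m).getD n [] =
      if n = m then PySem.List.sorted (d.getD n [] ++ [p]) (fun y => y) false else d.getD n [] := by
  by_cases hc : d.contains m = true
  · simp only [pvStepA, hc, if_true, PySem.Dict.getD_insert]
    split_ifs with h
    · subst h; rfl
    · rfl
  · simp only [pvStepA, Bool.not_eq_true] at *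
    simp [hc, PySem.Dict.getD_insert]
    split_ifs with h
    · subst h; simp [PySem.Dict.getD_of_not_contains d _ hc]
    · rfl

theorem getD_pvStepB (d : PySem.Dict String (List String)) (p m n : String) :
    (pvStepB p d m).getD n [] = if n = m then d.getD n [] ++ [p] else d.getD n [] := by
  simp [pvStepB, PySem.Dict.getD_insert]
  split_ifs with h
  · subst h; rfl
  · rfl

theorem getD_pvStepP (d : PySem.Dict String (List String)) (m n : String) :
    (pvStepP d m).getD n [] = d.getD n [] := by
  by_cases h : n = m
  · subst h; simp [pvStepP, PySem.Dict.getD_setdefault_self]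
  · simp [pvStepP, PySem.Dict.getD_eq_get?_getD, PySem.Dict.get?_setdefault_of_ne _ _ h]

theorem getD_foldA_inner (p n : String) :
    ∀ (ns : List String) (d : PySem.Dict String (List String)),
      (ns.foldl (pvStepA p) d).getD n [] =
        pvSortApp (d.getD n []) ((ns.filter (fun m => m == n)).map (fun _ => p)) := by
  intro ns
  induction ns with
  | nil => intro d; rfl
  | cons m ns ih =>
    intro d
    simp only [List.foldl_cons, ih, getD_pvStepA]
    by_cases h : n = m
    · subst h
      simp [pvSortApp]
    · have h2 : (m == n) = false := by simp; exact Ne.symm h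
      simp [h, h2]

theorem getD_foldB_inner (p n : String) :
    ∀ (ns : List String) (d : PySem.Dict String (List String)),
      (ns.foldl (pvStepB p) d).getD n [] =
        d.getD n [] ++ (ns.filter (fun m => m == n)).map (fun _ => p) := by
  intro ns
  induction ns with
  | nil => intro d; simp
  | cons m ns ih =>
    intro d
    simp only [List.foldl_cons, ih, getD_pvStepB]
    by_cases h : n = m
    · subst h; simp
    · have h2 : (m == n) = false := by simp; exact Ne.symm h
      simp [h, h2]

theorem getD_foldP_inner (n : String) :
    ∀ (ns : List String) (d : PySem.Dict String (List String)),
      (ns.foldl pvStepP d).getD n [] = d.getD n [] := by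
  intro ns
  induction ns with
  | nil => intro d; rfl
  | cons m ns ih => intro d; simp only [List.foldl_cons, ih, getD_pvStepP]

theorem pvSortApp_append (u : List String) (c1 c2 : List String) :
    pvSortApp u (c1 ++ c2) = pvSortApp (pvSortApp u c1) c2 := by
  simp [pvSortApp, List.foldl_append]

theorem getD_foldA (n : String) :
    ∀ (l : List (String × List String)) (d : PySem.Dict String (List String)),
      (l.foldl (fun acc pn => pn.2.foldl (pvStepA pn.1) acc) d).getD n [] =
        pvSortApp (d.getD n []) (pvContrib n l) := by
  intro l
  induction l with
  | nil => intro d; rfl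
  | cons pn l ih =>
    intro d
    simp only [List.foldl_cons, ih, getD_foldA_inner, pvContrib, List.flatMap_cons]
    rw [pvSortApp_append]

theorem getD_foldB (n : String) :
    ∀ (l : List (String × List String)) (d : PySem.Dict String (List String)),
      (l.foldl (fun acc pn => pn.2.foldl (pvStepB pn.1) acc) d).getD n [] =
        d.getD n [] ++ pvContrib n l := by
  intro l
  induction l with
  | nil => intro d; simp [pvContrib]
  | cons pn l ih =>
    intro d
    simp only [List.foldl_cons, ih, getD_foldB_inner, pvContrib, List.flatMap_cons]
    simp [List.append_assoc]

theorem getD_foldP (n : String) :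
    ∀ (l : List (String × List String)) (d : PySem.Dict String (List String)),
      (l.foldl (fun acc pn => pn.2.foldl pvStepP acc) d).getD n [] = d.getD n [] := by
  intro l
  induction l with
  | nil => intro d; rfl
  | cons pn l ih => intro d; simp only [List.foldl_cons, ih, getD_foldP_inner]

theorem pvSortApp_sorted :
    ∀ (c u : List String),
      pvSortApp (PySem.List.sorted u (fun y => y) false) c =
        PySem.List.sorted (u ++ c) (fun y => y) false := by
  intro c
  induction c with
  | nil => intro u; simp [pvSortApp]
  | cons x c ih =>
    intro u
    have hperm : (PySem.List.sorted u (fun y => y) false ++ [x]).Perm (u ++ [x]) :=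
      (PySem.List.sorted_perm u _ _).append_right [x]
    have hs : PySem.List.sorted (PySem.List.sorted u (fun y => y) false ++ [x]) (fun y => y) false
        = PySem.List.sorted (u ++ [x]) (fun y => y) false :=
      PySem.List.sorted_eq_sorted_of_perm _ _ _ (fun a b h => h) hperm
    show pvSortApp (PySem.List.sorted (PySem.List.sorted u (fun y => y) false ++ [x]) (fun y => y) false) c = _
    rw [hs, ih (u ++ [x])]
    simp

theorem getD_A_empty (n : String) (l : List (String × List String)) :
    (l.foldl (fun acc pn => pn.2.foldl (pvStepA pn.1) acc)
        (PySem.Dict.empty : PySem.Dict String (List String))).getD n [] =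
      PySem.List.sorted (pvContrib n l) (fun y => y) false := by
  rw [getD_foldA, PySem.Dict.getD_empty]
  have h0 : ([] : List String) = PySem.List.sorted [] (fun y : String => y) false := rfl
  rw [h0, pvSortApp_sorted]
  simp

theorem keys_pvStepA (d : PySem.Dict String (List String)) (p m : String) :
    (pvStepA p d m).keys = PySem.Set.add d.keys m := by
  by_cases hc : d.contains m = true
  · have hm : m ∈ d.keys := (PySem.Dict.contains_iff_mem_keys d m).mp hc
    simp only [pvStepA, hc, if_true]
    rw [PySem.Dict.keys_insert_of_contains d _ hc, PySem.Set.add_of_mem hm]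
  · have hc' : d.contains m = false := by simpa using hc
    have hm : m ∉ d.keys := fun h => hc ((PySem.Dict.contains_iff_mem_keys d m).mpr h)
    simp only [pvStepA, hc', if_false, Bool.false_eq_true]
    rw [PySem.Dict.keys_insert_of_contains _ _ (PySem.Dict.contains_insert_self d m []),
      PySem.Dict.keys_insert_of_not_contains d _ hc', PySem.Set.add_of_not_mem hm]

theorem keys_pvStepP (d : PySem.Dict String (List String)) (m : String) :
    (pvStepP d m).keys = PySem.Set.add d.keys m := by
  by_cases hc : d.contains m = true
  · have hm : m ∈ d.keys := (PySem.Dict.contains_iff_mem_keys d m).mp hc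
    rw [pvStepP, PySem.Dict.setdefault_of_contains d _ hc, PySem.Set.add_of_mem hm]
  · have hc' : d.contains m = false := by simpa using hc
    have hm : m ∉ d.keys := fun h => hc ((PySem.Dict.contains_iff_mem_keys d m).mpr h)
    rw [pvStepP, PySem.Dict.setdefault_of_not_contains d _ hc',
      PySem.Dict.keys_insert_of_not_contains d _ hc', PySem.Set.add_of_not_mem hm]

theorem keys_fold_add (f : PySem.Dict String (List String) → String → PySem.Dict String (List String))
    (hf : ∀ d m, (f d m).keys = PySem.Set.add d.keys m) :
    ∀ (ns : List String) (d : PySem.Dict String (List String)),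
      (ns.foldl f d).keys = PySem.Set.update d.keys ns := by
  intro ns
  induction ns with
  | nil => intro d; rfl
  | cons m ns ih =>
    intro d
    rw [List.foldl_cons, ih, hf, PySem.Set.update_cons]

theorem keys_fold_outer (g : PySem.Dict String (List String) → (String × List String) → PySem.Dict String (List String))
    (hg : ∀ d pn, (g d pn).keys = PySem.Set.update d.keys pn.2) :
    ∀ (l : List (String × List String)) (d : PySem.Dict String (List String)),
      (l.foldl g d).keys = PySem.Set.update d.keys (l.flatMap (fun pn => pn.2)) := by
  intro l
  induction l with
  | nil => intro d; rfl
  | cons pn l ih =>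
    intro d
    rw [List.foldl_cons, ih, hg, List.flatMap_cons, PySem.Set.update_append]

theorem keys_foldB_inner (p : String) :
    ∀ (ns : List String) (d : PySem.Dict String (List String)),
      (∀ m ∈ ns, m ∈ d.keys) → (ns.foldl (pvStepB p) d).keys = d.keys := by
  intro ns
  induction ns with
  | nil => intro d _; rfl
  | cons m ns ih =>
    intro d h
    have hm : m ∈ d.keys := h m (.head _)
    have hc : d.contains m = true := (PySem.Dict.contains_iff_mem_keys d m).mpr hm
    have hk : (pvStepB p d m).keys = d.keys := PySem.Dict.keys_insert_of_contains d _ hc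
    rw [List.foldl_cons, ih _ (fun x hx => hk ▸ h x (.tail _ hx)), hk]

theorem keys_foldB (l : List (String × List String)) :
    ∀ (d : PySem.Dict String (List String)),
      (∀ pn ∈ l, ∀ m ∈ pn.2, m ∈ d.keys) →
      (l.foldl (fun acc pn => pn.2.foldl (pvStepB pn.1) acc) d).keys = d.keys := by
  induction l with
  | nil => intro d _; rfl
  | cons pn l ih =>
    intro d h
    have hk : (pn.2.foldl (pvStepB pn.1) d).keys = d.keys :=
      keys_foldB_inner pn.1 pn.2 d (h pn (.head _))
    rw [List.foldl_cons, ih _ (fun q hq m hm => hk ▸ h q (.tail _ hq) m hm), hk]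

theorem mem_pvContrib {y n : String} {l : List (String × List String)}
    (h : y ∈ pvContrib n l) : ∃ q ∈ l, y = q.1 := by
  simp only [pvContrib, List.mem_flatMap, List.mem_map] at h
  obtain ⟨q, hq, _, _, rfl⟩ := h
  exact ⟨q, hq, rfl⟩

theorem pairwise_map_const (k : String) (xs : List String) :
    (xs.map (fun _ => k)).Pairwise (fun a b : String => a ≤ b) := by
  induction xs with
  | nil => exact .nil
  | cons x xs ih =>
    simp only [List.map_cons, List.pairwise_cons]
    exact ⟨fun y hy => by obtain ⟨_, _, rfl⟩ := List.mem_map.mp hy; exact le_refl k, ih⟩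

theorem pairwise_pvContrib (n : String) :
    ∀ (l : List (String × List String)),
      l.Pairwise (fun a b => a.1 ≤ b.1) → (pvContrib n l).Pairwise (fun a b : String => a ≤ b) := by
  intro l
  induction l with
  | nil => intro _; exact .nil
  | cons pn l ih =>
    intro h
    rw [List.pairwise_cons] at h
    show ((pn.2.filter (fun m => m == n)).map (fun _ => pn.1) ++ pvContrib n l).Pairwise _
    rw [List.pairwise_append]
    refine ⟨pairwise_map_const _ _, ih h.2, ?_⟩
    intro x hx y hy
    obtain ⟨_, _, rfl⟩ := List.mem_map.mp hx
    obtain ⟨q, hq, rfl⟩ := mem_pvContrib hy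
    exact h.1 q hq

theorem pvContrib_sorted (n : String) (l : List (String × List String)) :
    pvContrib n (PySem.List.sorted l (fun pn => pn.1) false) =
      PySem.List.sorted (pvContrib n l) (fun y => y) false := by
  symm
  apply PySem.List.sorted_id_eq_of_perm_of_pairwise
  · exact List.Perm.flatMap_right _ (PySem.List.sorted_perm l _ _)
  · exact pairwise_pvContrib n _ (PySem.List.sorted_pairwise l (fun pn => pn.1))

theorem main (l : List (String × List String)) :
    ((PySem.List.sorted l (fun pn => pn.1) false).foldl
        (fun acc pn => pn.2.foldl (pvStepB pn.1) acc)
        (l.foldl (fun acc pn => pn.2.foldl pvStepP acc)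
          (PySem.Dict.empty : PySem.Dict String (List String)))).items
      = (l.foldl (fun acc pn => pn.2.foldl (pvStepA pn.1) acc)
          (PySem.Dict.empty : PySem.Dict String (List String))).items := by
  set F := l.flatMap (fun pn => pn.2) with hF
  have hkA : (l.foldl (fun acc pn => pn.2.foldl (pvStepA pn.1) acc)
      (PySem.Dict.empty : PySem.Dict String (List String))).keys = PySem.Set.ofList F := by
    rw [keys_fold_outer _ (fun d pn => keys_fold_add (pvStepA pn.1) (keys_pvStepA · pn.1 ·) pn.2 d) l PySem.Dict.empty,
      PySem.Dict.keys_empty]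
    exact PySem.Set.update_empty F
  have hkP : (l.foldl (fun acc pn => pn.2.foldl pvStepP acc)
      (PySem.Dict.empty : PySem.Dict String (List String))).keys = PySem.Set.ofList F := by
    rw [keys_fold_outer _ (fun d pn => keys_fold_add _ keys_pvStepP pn.2 d) l PySem.Dict.empty,
      PySem.Dict.keys_empty]
    exact PySem.Set.update_empty F
  have hkB : ((PySem.List.sorted l (fun pn => pn.1) false).foldl
      (fun acc pn => pn.2.foldl (pvStepB pn.1) acc)
      (l.foldl (fun acc pn => pn.2.foldl pvStepP acc)
        (PySem.Dict.empty : PySem.Dict String (List String)))).keys = PySem.Set.ofList F := by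
    rw [keys_foldB _ _ ?_, hkP]
    intro pn hpn m hm
    rw [hkP, PySem.Set.mem_ofList]
    exact List.mem_flatMap.mpr ⟨pn, (PySem.List.mem_sorted l _ _ pn).mp hpn, hm⟩
  have hnd : (PySem.Set.ofList F).Nodup := PySem.Set.nodup_ofList F
  rw [PySem.Dict.items_eq_map_keys _ (by rw [hkB]; exact hnd) ([] : List String),
    PySem.Dict.items_eq_map_keys _ (by rw [hkA]; exact hnd) ([] : List String), hkA, hkB]
  apply List.map_congr_left
  intro k _
  have hB : ((PySem.List.sorted l (fun pn => pn.1) false).foldl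
      (fun acc pn => pn.2.foldl (pvStepB pn.1) acc)
      (l.foldl (fun acc pn => pn.2.foldl pvStepP acc)
        (PySem.Dict.empty : PySem.Dict String (List String)))).getD k []
      = pvContrib k (PySem.List.sorted l (fun pn => pn.1) false) := by
    rw [getD_foldB, getD_foldP, PySem.Dict.getD_empty, List.nil_append]
  rw [hB, getD_A_empty, pvContrib_sorted]

-- ===== VERDICT (by name: the statement is the Claim_ definition above) =====
theorem invert_network_spec : Claim_equal_invert_network := by
  intro l _
  show invert_network l = invert_network_alt l
  have hA : invert_network l
      = (l.foldl (fun acc pn => pn.2.foldl (pvStepA pn.1) acc)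
          (PySem.Dict.empty : PySem.Dict String (List String))).items := rfl
  have hB : invert_network_alt l
      = ((PySem.List.sorted l (fun pn => pn.1) false).foldl
          (fun acc pn => pn.2.foldl (pvStepB pn.1) acc)
          (l.foldl (fun acc pn => pn.2.foldl pvStepP acc)
            (PySem.Dict.empty : PySem.Dict String (List String)))).items := rfl
  rw [hA, hB]
  exact (main l).symm
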